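-- pv_equiv track=rewrite | github.com/cutehammond772/problem-solving-archive | 백준/Gold/15790. 최종병기 활/최종병기 활.py | solve
-- ===== SOURCE A (Python) =====
-- def solve(N, M, X, K):
-- 	x, y = 1, 100001
--
-- 	# Parametric Search
-- 	while x < y:
-- 		length = (x + y) // 2
-- 		possible = False
--
-- 		# 처음으로 자르는 위치를 정한다.
-- 		for offset in range(M):
-- 			accumulation = 0
-- 			count = 0
--
-- 			X.append(N + X[offset])
--
-- 			for i in range(offset, M):
-- 				accumulation += X[i + 1] - X[i]
--
-- 				if accumulation >= length:
-- 					accumulation = 0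
-- 					count += 1
--
-- 			X.pop()
--
-- 			if count >= K:
-- 				possible = True
-- 				break
--
-- 		if possible:
-- 			x = length + 1
-- 		else:
-- 			y = length
--
-- 	result = x - 1
-- 	return result if result else -1
-- ===== SOURCE B (Python) =====
-- def solve(N, M, X, K):
--     def feasible(length):
--         # nxt[i]: first cut point reachable from X[i] by an arc of at least `length`
--         nxt = [None] * M
--         for i in range(M):
--             for j in range(i + 1, M):
--                 if X[j] - X[i] >= length:
--                     nxt[i] = j
--                     break
--         # suffix DP over the jump pointers:
--         # jumps[i] = cuts reachable after a cut at i, last[i] = index of the final cut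
--         jumps = [0] * M
--         last = list(range(M))
--         for i in range(M - 1, -1, -1):
--             if nxt[i] is not None:
--                 jumps[i] = jumps[nxt[i]] + 1
--                 last[i] = last[nxt[i]]
--         for off in range(M):
--             cuts = jumps[off]
--             # closing arc: from the final cut around the circle back to the start point
--             if N + X[off] - X[last[off]] >= length:
--                 cuts += 1
--             if cuts >= K:
--                 return True
--         return False
--
--     lo, hi = 1, 100001
--     while lo < hi:
--         mid = (lo + hi) // 2
--         if feasible(mid):
--             lo = mid + 1
--         else:
--             hi = mid
--     return lo - 1 if lo > 1 else -1
-- ===== Notes on version B (the rewrite author's own statement) =====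
-- stated objective: alternative
-- what changed: A re-runs the greedy accumulate-and-reset scan from scratch for every starting offset inside every binary-search step; B instead builds, once per step, a jump-pointer table nxt[i] (first point at distance >= length) plus a right-to-left suffix DP (jumps[i], last[i]) over it, so each offset's cut count is a single table lookup plus the closing-arc test; Pre_ restricts to consistent inputs (M = len(X), or M <= 0 with no points), excluding 0 < M < len(X), where A's closing arc accidentally reads the leftover element X[M], and M > len(X), where A raises IndexError.
-- outside the precondition, e.g. on solve(-14, 4, [-4, -2, 0, 10, 14, 15], 1): A returns 18, B returns 14
import Mathlib
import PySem

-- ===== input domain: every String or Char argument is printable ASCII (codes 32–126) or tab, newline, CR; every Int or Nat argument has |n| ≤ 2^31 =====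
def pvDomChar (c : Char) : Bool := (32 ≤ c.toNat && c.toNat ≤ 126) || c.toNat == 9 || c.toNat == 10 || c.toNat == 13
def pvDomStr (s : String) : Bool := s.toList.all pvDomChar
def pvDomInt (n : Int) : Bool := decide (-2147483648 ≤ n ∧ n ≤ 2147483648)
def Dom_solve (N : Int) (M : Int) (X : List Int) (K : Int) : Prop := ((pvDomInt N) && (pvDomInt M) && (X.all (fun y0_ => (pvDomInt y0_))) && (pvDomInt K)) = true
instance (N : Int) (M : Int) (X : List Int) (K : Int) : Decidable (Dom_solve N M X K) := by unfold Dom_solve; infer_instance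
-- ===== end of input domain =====

-- B replaces A's per-offset greedy rescan by one jump-pointer table (first reachable cut per
-- index) plus a right-to-left suffix DP, reused by every offset of the feasibility check;
-- same binary search, return value only (A's temporary append/pop of X has no net effect).

-- ===== PORT A =====
-- inner loop body: accumulation += X[i+1] - X[i]; if accumulation >= length: reset, count += 1
def aStep (XE : List Int) (L : Int) (s : Int × Int) (i : Int) : Int × Int :=
  if s.1 + (PySem.List.pyGetD XE (i + 1) 0 - PySem.List.pyGetD XE i 0) ≥ L then (0, s.2 + 1)
  else (s.1 + (PySem.List.pyGetD XE (i + 1) 0 - PySem.List.pyGetD XE i 0), s.2)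

-- one offset: X.append(N + X[offset]); greedy count over i in range(offset, M); X.pop()
def aCount (N M L : Int) (X : List Int) (off : Int) : Int :=
  ((PySem.List.pyRange off M).foldl
    (aStep (X ++ [N + PySem.List.pyGetD X off 0]) L) (0, 0)).2

-- for offset in range(M): … if count >= K: possible = True; break
def aFeas (N M L K : Int) (X : List Int) : List Int → Bool
  | [] => false
  | off :: rest => if aCount N M L X off ≥ K then true else aFeas N M L K X rest

-- while x < y: length = (x+y)//2; if possible: x = length+1 else: y = length
def aSearch (N M K : Int) (X : List Int) (x y : Int) : Int :=
  if _hxy : x < y then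
    if aFeas N M (PySem.Int.floordiv (x + y) 2) K X (PySem.List.pyRange 0 M) then
      aSearch N M K X (PySem.Int.floordiv (x + y) 2 + 1) y
    else aSearch N M K X x (PySem.Int.floordiv (x + y) 2)
  else x
termination_by (y - x).toNat
decreasing_by
  · have h1 := (PySem.Int.le_floordiv_iff_mul_le (a := x + y) (b := 2) (q := x) (by omega : (0:Int) < 2)).2 (by omega : x * 2 ≤ x + y)
    have h2 := (PySem.Int.floordiv_lt_iff_lt_mul (a := x + y) (b := 2) (q := y) (by omega : (0:Int) < 2)).2 (by omega : x + y < y * 2)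
    omega
  · have h1 := (PySem.Int.le_floordiv_iff_mul_le (a := x + y) (b := 2) (q := x) (by omega : (0:Int) < 2)).2 (by omega : x * 2 ≤ x + y)
    have h2 := (PySem.Int.floordiv_lt_iff_lt_mul (a := x + y) (b := 2) (q := y) (by omega : (0:Int) < 2)).2 (by omega : x + y < y * 2)
    omega

-- result = x - 1; return result if result else -1
def solve (N : Int) (M : Int) (X : List Int) (K : Int) : Int :=
  if aSearch N M K X 1 100001 - 1 ≠ 0 then aSearch N M K X 1 100001 - 1 else -1

-- ===== PORT B =====
-- scan for the first index j in the list with X[j] - v >= length (inner loop of the nxt table)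
def bScan (X : List Int) (L v : Int) : List Int → Option Int
  | [] => none
  | j :: rest => if PySem.List.pyGetD X j 0 - v ≥ L then some j else bScan X L v rest

-- nxt[i]: first j > i with X[j] - X[i] >= length (None if no such j < M)
def bNext (X : List Int) (M L i : Int) : Option Int :=
  bScan X L (PySem.List.pyGetD X i 0) (PySem.List.pyRange (i + 1) M)

-- the jumps/last arrays, filled for i in range(M-1, -1, -1); index i ↦ (jumps[i], last[i])
def bFill (X : List Int) (M L : Int) : PySem.Dict Int (Int × Int) :=
  (PySem.List.pyRange (M - 1) (-1) (-1)).foldl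
    (fun d i =>
      d.insert i
        (match bNext X M L i with
         | none => (0, i)
         | some j => ((d.getD j (0, j)).1 + 1, (d.getD j (0, j)).2)))
    PySem.Dict.empty

-- for off in range(M): cuts = jumps[off] (+1 if the closing arc, from the final cut around
-- the circle back to the start point, is long enough); if cuts >= K: return True
def bFeasLoop (N M L K : Int) (X : List Int) (d : PySem.Dict Int (Int × Int)) : List Int → Bool
  | [] => false
  | off :: rest =>
    if (d.getD off (0, off)).1 +
        (if N + PySem.List.pyGetD X off 0
              - PySem.List.pyGetD X (d.getD off (0, off)).2 0 ≥ L then 1 else 0) ≥ K then true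
    else bFeasLoop N M L K X d rest

def bFeas (N M L K : Int) (X : List Int) : Bool :=
  bFeasLoop N M L K X (bFill X M L) (PySem.List.pyRange 0 M)

-- while lo < hi: mid = (lo+hi)//2; if feasible(mid): lo = mid+1 else: hi = mid
def bSearch (N M K : Int) (X : List Int) (lo hi : Int) : Int :=
  if _hxy : lo < hi then
    if bFeas N M (PySem.Int.floordiv (lo + hi) 2) K X then
      bSearch N M K X (PySem.Int.floordiv (lo + hi) 2 + 1) hi
    else bSearch N M K X lo (PySem.Int.floordiv (lo + hi) 2)
  else lo
termination_by (hi - lo).toNat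
decreasing_by
  · have h1 := (PySem.Int.le_floordiv_iff_mul_le (a := lo + hi) (b := 2) (q := lo) (by omega : (0:Int) < 2)).2 (by omega : lo * 2 ≤ lo + hi)
    have h2 := (PySem.Int.floordiv_lt_iff_lt_mul (a := lo + hi) (b := 2) (q := hi) (by omega : (0:Int) < 2)).2 (by omega : lo + hi < hi * 2)
    omega
  · have h1 := (PySem.Int.le_floordiv_iff_mul_le (a := lo + hi) (b := 2) (q := lo) (by omega : (0:Int) < 2)).2 (by omega : lo * 2 ≤ lo + hi)
    have h2 := (PySem.Int.floordiv_lt_iff_lt_mul (a := lo + hi) (b := 2) (q := hi) (by omega : (0:Int) < 2)).2 (by omega : lo + hi < hi * 2)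
    omega

-- return lo - 1 if lo > 1 else -1
def solve_alt (N : Int) (M : Int) (X : List Int) (K : Int) : Int :=
  if bSearch N M K X 1 100001 > 1 then bSearch N M K X 1 100001 - 1 else -1

-- ===== PRECONDITION & SPEC =====
-- Pre_ restricts to consistent inputs, M = len(X) (or M ≤ 0: no points at all): for
-- M > len(X) A raises IndexError, and for 0 < M < len(X) A's closing arc accidentally
-- reads the leftover element X[M] instead of the wrap-around point, a value that depends
-- on junk the problem's input format never produces.
def Pre_solve (N : Int) (M : Int) (X : List Int) (K : Int) : Prop :=
  M ≤ 0 ∨ M = (X.length : Int)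
instance (N : Int) (M : Int) (X : List Int) (K : Int) : Decidable (Pre_solve N M X K) := by unfold Pre_solve; infer_instance

def pvWitness_solve : Int × Int × List Int × Int := (8, 4, [0, 2, 4, 6], 2)

def Spec_solve (N : Int) (M : Int) (X : List Int) (K : Int) (out : Int) : Prop := out = solve_alt N M X K
instance (N : Int) (M : Int) (X : List Int) (K : Int) (out : Int) : Decidable (Spec_solve N M X K out) := by unfold Spec_solve; infer_instance

-- ===== CLAIM (what is proved, stated in full; the proofs are below) =====
def Claim_equal_solve : Prop := ∀ (N : Int) (M : Int) (X : List Int) (K : Int), Dom_solve N M X K → Pre_solve N M X K → Spec_solve N M X K (solve N M X K)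

-- ===== LEMMAS AND PROOFS =====

theorem bScan_mem {X : List Int} {L v t : Int} : ∀ {js : List Int},
    bScan X L v js = some t → t ∈ js := by
  intro js
  induction js with
  | nil => intro h; simp [bScan] at h
  | cons j rest ih =>
    intro h
    simp only [bScan] at h
    split at h
    · simp only [Option.some.injEq] at h; simp [h]
    · exact List.mem_cons_of_mem _ (ih h)

-- the jump chain from a cut at p, scanning candidates from index j on:
-- (number of further cuts, index of the final cut)
def chainF (X : List Int) (M L : Int) (j p : Int) : Int × Int :=
  match h : bScan X L (PySem.List.pyGetD X p 0) (PySem.List.pyRange j M) with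
  | none => (0, p)
  | some t =>
    have ht := PySem.List.mem_pyRange_one.1 (bScan_mem h)
    ((chainF X M L (t + 1) t).1 + 1, (chainF X M L (t + 1) t).2)
termination_by (M - j).toNat
decreasing_by omega

theorem chainF_eq (X : List Int) (M L j p : Int) :
    chainF X M L j p =
      match bScan X L (PySem.List.pyGetD X p 0) (PySem.List.pyRange j M) with
      | none => (0, p)
      | some t => ((chainF X M L (t + 1) t).1 + 1, (chainF X M L (t + 1) t).2) := by
  rw [chainF]
  split
  · next h => conv_rhs => rw [h]
  · next t h => conv_rhs => rw [h]

theorem chainF_nil {X : List Int} {M L j p : Int} (hjM : M ≤ j) :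
    chainF X M L j p = (0, p) := by
  rw [chainF_eq, PySem.List.pyRange_one_eq_nil hjM]
  simp [bScan]

theorem chainF_cut {X : List Int} {M L j p : Int} (hjM : j < M)
    (hc : PySem.List.pyGetD X j 0 - PySem.List.pyGetD X p 0 ≥ L) :
    chainF X M L j p = ((chainF X M L (j + 1) j).1 + 1, (chainF X M L (j + 1) j).2) := by
  rw [chainF_eq, PySem.List.pyRange_one_cons hjM]
  simp [bScan, if_pos hc]

theorem chainF_nocut {X : List Int} {M L j p : Int} (hjM : j < M)
    (hc : ¬ PySem.List.pyGetD X j 0 - PySem.List.pyGetD X p 0 ≥ L) :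
    chainF X M L j p = chainF X M L (j + 1) p := by
  rw [chainF_eq, PySem.List.pyRange_one_cons hjM]
  simp only [bScan, if_neg hc]
  exact (chainF_eq X M L (j + 1) p).symm

theorem chainF_bNext (X : List Int) (M L p : Int) :
    chainF X M L (p + 1) p =
      match bNext X M L p with
      | none => (0, p)
      | some t => ((chainF X M L (t + 1) t).1 + 1, (chainF X M L (t + 1) t).2) := by
  rw [chainF_eq]
  rfl

-- forward cut count: scan indices js, cutting whenever XE[j] - XE[p] ≥ L (p = last cut)
def cntFwd (XE : List Int) (L : Int) : List Int → Int → Int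
  | [], _ => 0
  | j :: rest, p =>
    if PySem.List.pyGetD XE j 0 - PySem.List.pyGetD XE p 0 ≥ L then 1 + cntFwd XE L rest j
    else cntFwd XE L rest p

theorem fold_eq_cntFwd (XE : List Int) (L M : Int) : ∀ (n : Nat) (i p c acc : Int),
    (M - i).toNat = n →
    acc = PySem.List.pyGetD XE i 0 - PySem.List.pyGetD XE p 0 →
    ((PySem.List.pyRange i M).foldl (aStep XE L) (acc, c)).2
      = c + cntFwd XE L (PySem.List.pyRange (i + 1) (M + 1)) p := by
  intro n
  induction n with
  | zero =>
    intro i p c acc hn hacc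
    rw [PySem.List.pyRange_one_eq_nil (by omega), PySem.List.pyRange_one_eq_nil (by omega)]
    simp [cntFwd]
  | succ n ih =>
    intro i p c acc hn hacc
    have hiM : i < M := by omega
    rw [PySem.List.pyRange_one_cons hiM,
        PySem.List.pyRange_one_cons (a := i + 1) (b := M + 1) (by omega)]
    simp only [List.foldl_cons, cntFwd, aStep]
    have hval : acc + (PySem.List.pyGetD XE (i + 1) 0 - PySem.List.pyGetD XE i 0)
        = PySem.List.pyGetD XE (i + 1) 0 - PySem.List.pyGetD XE p 0 := by omega
    rw [hval]
    split
    · rw [ih (i + 1) (i + 1) (c + 1) 0 (by omega) (by omega)]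
      omega
    · rw [ih (i + 1) p c _ (by omega) rfl]

theorem pyGetD_append_lt (X : List Int) (W : Int) {j : Int} (h0 : 0 ≤ j)
    (hj : j < (X.length : Int)) :
    PySem.List.pyGetD (X ++ [W]) j 0 = PySem.List.pyGetD X j 0 := by
  rw [PySem.List.pyGetD_eq_getElem _ _ h0 (by simp; omega),
      PySem.List.pyGetD_eq_getElem _ _ h0 hj,
      List.getElem_append_left (by omega)]

theorem pyGetD_append_len (X : List Int) (W : Int) :
    PySem.List.pyGetD (X ++ [W]) (X.length : Int) 0 = W := by
  rw [PySem.List.pyGetD_eq_getElem _ _ (by omega) (by simp)]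
  simp

theorem cntFwd_eq_chainF (X XE : List Int) (L M W : Int)
    (hlt : ∀ j : Int, 0 ≤ j → j < M → PySem.List.pyGetD XE j 0 = PySem.List.pyGetD X j 0)
    (hMv : PySem.List.pyGetD XE M 0 = W) :
    ∀ (n : Nat) (j p : Int), (M - j).toNat = n → 0 ≤ p → p < j → p < M →
    cntFwd XE L (PySem.List.pyRange j M ++ [M]) p
      = (chainF X M L j p).1 +
        (if W - PySem.List.pyGetD X (chainF X M L j p).2 0 ≥ L then 1 else 0) := by
  intro n
  induction n with
  | zero =>
    intro j p hn h0p hpj hpM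
    rw [PySem.List.pyRange_one_eq_nil (by omega), chainF_nil (by omega)]
    simp only [List.nil_append, cntFwd]
    rw [hMv, hlt p h0p hpM]
    split <;> simp
  | succ n ih =>
    intro j p hn h0p hpj hpM
    have hjM : j < M := by omega
    have h0j : 0 ≤ j := by omega
    rw [PySem.List.pyRange_one_cons hjM]
    simp only [List.cons_append, cntFwd]
    rw [hlt j h0j hjM, hlt p h0p hpM]
    by_cases hc : PySem.List.pyGetD X j 0 - PySem.List.pyGetD X p 0 ≥ L
    · rw [if_pos hc, chainF_cut hjM hc, ih (j + 1) j (by omega) h0j (by omega) hjM]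
      dsimp only
      omega
    · rw [if_neg hc, chainF_nocut hjM hc, ih (j + 1) p (by omega) h0p (by omega) hpM]

theorem aCount_eq (N M L : Int) (X : List Int) (off : Int) (hM : M = (X.length : Int))
    (h0 : 0 ≤ off) (hoff : off < M) :
    aCount N M L X off
      = (chainF X M L (off + 1) off).1 +
        (if N + PySem.List.pyGetD X off 0
              - PySem.List.pyGetD X (chainF X M L (off + 1) off).2 0 ≥ L then 1 else 0) := by
  unfold aCount
  rw [fold_eq_cntFwd _ _ M (M - off).toNat off off 0 0 rfl (by omega)]
  rw [PySem.List.pyRange_one_succ_right (by omega)]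
  rw [cntFwd_eq_chainF X (X ++ [N + PySem.List.pyGetD X off 0]) L M
        (N + PySem.List.pyGetD X off 0)
        (fun j hj0 hjM => pyGetD_append_lt X _ hj0 (by omega))
        (by rw [hM]; exact pyGetD_append_len X _)
        (M - (off + 1)).toNat (off + 1) off rfl h0 (by omega) hoff]
  omega

theorem bFill_get? (X : List Int) (M L : Int) : ∀ (n : Nat) (a : Int)
    (d : PySem.Dict Int (Int × Int)), (a + 1).toNat = n → a < M →
    (∀ j, a < j → j < M → d.get? j = some (chainF X M L (j + 1) j)) →
    ∀ j, 0 ≤ j → j < M →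
      ((PySem.List.pyRange a (-1) (-1)).foldl
        (fun d i =>
          d.insert i
            (match bNext X M L i with
             | none => (0, i)
             | some t => ((d.getD t (0, t)).1 + 1, (d.getD t (0, t)).2))) d).get? j
        = some (chainF X M L (j + 1) j) := by
  intro n
  induction n with
  | zero =>
    intro a d hn ha hd j h0j hjM
    rw [PySem.List.pyRange_neg_one_eq_nil (by omega)]
    exact hd j (by omega) hjM
  | succ n ih =>
    intro a d hn ha hd j h0j hjM
    have h0a : 0 ≤ a := by omega
    rw [PySem.List.pyRange_neg_one_cons (by omega)]
    simp only [List.foldl_cons]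
    apply ih (a - 1) _ (by omega) (by omega) _ j h0j hjM
    intro j' haj' hj'M
    by_cases hja : j' = a
    · subst hja
      rw [PySem.Dict.get?_insert_self]
      congr 1
      rw [chainF_bNext]
      cases hbnv : bNext X M L j' with
      | none => rfl
      | some t =>
        have ht := PySem.List.mem_pyRange_one.1 (bScan_mem (hbnv ▸ rfl : bScan X L
          (PySem.List.pyGetD X j' 0) (PySem.List.pyRange (j' + 1) M) = some t))
        have hg : d.getD t (0, t) = chainF X M L (t + 1) t :=
          PySem.Dict.getD_of_get?_eq_some d _ (hd t (by omega) (by omega))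
        simp only [hg]
    · rw [PySem.Dict.get?_insert_of_ne _ _ hja]
      exact hd j' (by omega) hj'M

theorem bFill_getD (X : List Int) (M L : Int) (off : Int) (h0 : 0 ≤ off) (hoff : off < M) :
    (bFill X M L).getD off (0, off) = chainF X M L (off + 1) off := by
  apply PySem.Dict.getD_of_get?_eq_some
  unfold bFill
  exact bFill_get? X M L M.toNat (M - 1) PySem.Dict.empty (by omega) (by omega)
    (fun j h1 h2 => absurd h1 (by omega)) off h0 hoff

theorem feasLoop_eq (N M L K : Int) (X : List Int) (hM : M = (X.length : Int)) :
    ∀ offs : List Int, (∀ off ∈ offs, 0 ≤ off ∧ off < M) →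
    aFeas N M L K X offs = bFeasLoop N M L K X (bFill X M L) offs := by
  intro offs
  induction offs with
  | nil => intro _; rfl
  | cons off rest ih =>
    intro hmem
    obtain ⟨h0, hoff⟩ := hmem off List.mem_cons_self
    simp only [aFeas, bFeasLoop]
    rw [bFill_getD X M L off h0 hoff, ← aCount_eq N M L X off hM h0 hoff]
    split
    · rfl
    · exact ih (fun o ho => hmem o (List.mem_cons_of_mem _ ho))

theorem feas_eq (N M L K : Int) (X : List Int) (hpre : M ≤ 0 ∨ M = (X.length : Int)) :
    aFeas N M L K X (PySem.List.pyRange 0 M) = bFeas N M L K X := by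
  rcases hpre with hM0 | hM
  · unfold bFeas
    rw [PySem.List.pyRange_one_eq_nil hM0]
    rfl
  · unfold bFeas
    apply feasLoop_eq N M L K X hM
    intro off hoff
    have := PySem.List.mem_pyRange_one.1 hoff
    omega

theorem search_eq (N M K : Int) (X : List Int) (hpre : M ≤ 0 ∨ M = (X.length : Int)) :
    ∀ (n : Nat) (x y : Int), (y - x).toNat = n → aSearch N M K X x y = bSearch N M K X x y := by
  intro n
  induction n using Nat.strong_induction_on with
  | _ n ih =>
    intro x y hn
    rw [aSearch, bSearch]
    by_cases hxy : x < y
    · simp only [hxy, dif_pos]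
      have h1 := (PySem.Int.le_floordiv_iff_mul_le (a := x + y) (b := 2) (q := x) (by omega : (0:Int) < 2)).2 (by omega : x * 2 ≤ x + y)
      have h2 := (PySem.Int.floordiv_lt_iff_lt_mul (a := x + y) (b := 2) (q := y) (by omega : (0:Int) < 2)).2 (by omega : x + y < y * 2)
      rw [feas_eq N M _ K X hpre]
      split
      · exact ih (y - (PySem.Int.floordiv (x + y) 2 + 1)).toNat (by omega) _ _ rfl
      · exact ih (PySem.Int.floordiv (x + y) 2 - x).toNat (by omega) _ _ rfl
    · simp [hxy]

theorem search_ge (N M K : Int) (X : List Int) : ∀ (n : Nat) (x y : Int),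
    (y - x).toNat = n → x ≤ bSearch N M K X x y := by
  intro n
  induction n using Nat.strong_induction_on with
  | _ n ih =>
    intro x y hn
    rw [bSearch]
    by_cases hxy : x < y
    · simp only [hxy, dif_pos]
      have h1 := (PySem.Int.le_floordiv_iff_mul_le (a := x + y) (b := 2) (q := x) (by omega : (0:Int) < 2)).2 (by omega : x * 2 ≤ x + y)
      have h2 := (PySem.Int.floordiv_lt_iff_lt_mul (a := x + y) (b := 2) (q := y) (by omega : (0:Int) < 2)).2 (by omega : x + y < y * 2)
      split
      · have := ih (y - (PySem.Int.floordiv (x + y) 2 + 1)).toNat (by omega)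
          (PySem.Int.floordiv (x + y) 2 + 1) y rfl
        omega
      · exact ih (PySem.Int.floordiv (x + y) 2 - x).toNat (by omega) x _ rfl
    · simp [hxy]

-- ===== VERDICT (by name: the statement is the Claim_ definition above) =====
theorem solve_spec : Claim_equal_solve := by
  intro N M X K _ hpre
  unfold Spec_solve solve solve_alt
  rw [search_eq N M K X hpre 100000 1 100001 rfl]
  have hge : (1 : Int) ≤ bSearch N M K X 1 100001 :=
    search_ge N M K X 100000 1 100001 rfl
  by_cases h1 : bSearch N M K X 1 100001 = 1
  · simp [h1]
  · rw [if_pos (by omega), if_pos (by omega)]
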